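-- pv_equiv track=rewrite | github.com/tyler-netek/Spotify-Playlist-and-Artist-Recommendation | artist_recommendation/artist_recommendation.py | find_artist_by_name
-- ===== SOURCE A (Python) =====
-- from enum import Enum
--
-- NAME = 'name'
--
-- class Match(Enum):
--     EXIT = 'exit'
--     EXACT = 'exact'
--     YES = 'yes'
--     PARTIAL = 'partial'
--
-- def find_artist_by_name(query, id_to_artist):
--     partial_match = None
--     for artist_info in id_to_artist.values():
--         if query.lower() == artist_info[NAME].lower():
--             return Match.EXACT.value, artist_info
--
--     for artist_info in id_to_artist.values():
--         if query.lower() in artist_info[NAME].lower():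
--             partial_match = artist_info
--             break
--
--     if partial_match:
--         return Match.PARTIAL.value, partial_match
--     return None, None
-- ===== SOURCE B (Python) =====
-- def find_artist_by_name(query, id_to_artist):
--     # Single pass: return on the first exact match, remember the first partial match.
--     q = query.lower()
--     first_partial = None
--     for artist_info in id_to_artist.values():
--         low = artist_info['name'].lower()
--         if q == low:
--             return 'exact', artist_info
--         if first_partial is None and q in low:
--             first_partial = artist_info
--     if first_partial is not None:
--         return 'partial', first_partial
--     return None, None
-- ===== Notes on version B (the rewrite author's own statement) =====
-- stated objective: simpler
-- what changed: B replaces A's two sequential scans (one for an exact match, one for a partial match) by a single pass that returns immediately on an exact match and records the first partial match in a sentinel, hoisting query.lower() out of the loop; B also tests the sentinel with 'is not None' instead of dict truthiness.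
import Mathlib
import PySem

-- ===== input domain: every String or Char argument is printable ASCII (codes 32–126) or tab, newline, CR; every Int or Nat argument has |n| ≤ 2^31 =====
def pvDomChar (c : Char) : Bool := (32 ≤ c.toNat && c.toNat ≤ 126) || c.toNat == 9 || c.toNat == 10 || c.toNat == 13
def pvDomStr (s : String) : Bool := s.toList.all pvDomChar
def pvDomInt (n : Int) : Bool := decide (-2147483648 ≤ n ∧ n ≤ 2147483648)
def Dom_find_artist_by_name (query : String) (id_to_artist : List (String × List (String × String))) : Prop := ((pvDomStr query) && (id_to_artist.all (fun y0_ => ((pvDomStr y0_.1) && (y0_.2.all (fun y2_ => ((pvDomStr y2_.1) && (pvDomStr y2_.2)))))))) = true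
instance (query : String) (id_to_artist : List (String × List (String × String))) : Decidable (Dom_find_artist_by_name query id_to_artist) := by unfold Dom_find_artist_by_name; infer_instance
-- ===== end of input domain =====

-- B collapses A's two sequential scans into a single pass with a first-partial sentinel (objective: simpler).


-- ===== PORT A =====
-- the Python dicts: outer dict of ids, inner artist dicts (dict(pairs) semantics, duplicate keys collapse)
def pvVals (id_to_artist : List (String × List (String × String))) : List (PySem.Dict String String) :=
  (PySem.Dict.ofList id_to_artist).values.map PySem.Dict.ofList

-- first loop of A: first exact match (artist_info['name'] ported with getD ""; Pre_ excludes the KeyError)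
def pvExactLoop (query : String) : List (PySem.Dict String String) → Option (Option String × (Option (List (String × String))))
  | [] => none
  | d :: rest =>
    if PySem.Str.lower query == PySem.Str.lower ((d.get? "name").getD "") then
      some (some "exact", some d.items)
    else pvExactLoop query rest

-- second loop of A: first partial match, then break
def pvPartialLoop (query : String) : List (PySem.Dict String String) → Option (PySem.Dict String String)
  | [] => none
  | d :: rest =>
    if PySem.Str.isIn (PySem.Str.lower query) (PySem.Str.lower ((d.get? "name").getD "")) then some d
    else pvPartialLoop query rest

def find_artist_by_name (query : String) (id_to_artist : List (String × List (String × String))) : Option String × (Option (List (String × String))) :=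
  match pvExactLoop query (pvVals id_to_artist) with
  | some r => r
  | none =>
    match pvPartialLoop query (pvVals id_to_artist) with
    | some d => if d.size ≠ 0 then (some "partial", some d.items) else (none, none)  -- `if partial_match:` truthiness
    | none => (none, none)

-- ===== PORT B =====
-- B's single pass: return on exact match, carry the first partial match as a sentinel
def pvScan (q : String) (firstPartial : Option (PySem.Dict String String)) : List (PySem.Dict String String) → Option String × (Option (List (String × String)))
  | [] =>
    match firstPartial with
    | some d => (some "partial", some d.items)
    | none => (none, none)
  | d :: rest =>
    let low := PySem.Str.lower ((d.get? "name").getD "")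
    if q == low then (some "exact", some d.items)
    else pvScan q (if firstPartial.isNone && PySem.Str.isIn q low then some d else firstPartial) rest

def find_artist_by_name_alt (query : String) (id_to_artist : List (String × List (String × String))) : Option String × (Option (List (String × String))) :=
  pvScan (PySem.Str.lower query) none (pvVals id_to_artist)

-- ===== PRECONDITION & SPEC =====
-- Pre_ excludes inputs where some artist dict lacks the key 'name': A raises KeyError there, except when an
-- exact match occurs earlier in the scan, in which case A (and B) still return it — those rare inputs are
-- excluded too (cited in claim.json).
def Pre_find_artist_by_name (query : String) (id_to_artist : List (String × List (String × String))) : Prop :=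
  ∀ d ∈ pvVals id_to_artist, (d.get? "name").isSome = true
instance (query : String) (id_to_artist : List (String × List (String × String))) : Decidable (Pre_find_artist_by_name query id_to_artist) := by unfold Pre_find_artist_by_name; infer_instance

def pvWitness_find_artist_by_name : String × (List (String × List (String × String))) :=
  ("Bob", [("id1", [("name", "Adele")]), ("id2", [("name", "bobby")])])

def Spec_find_artist_by_name (query : String) (id_to_artist : List (String × List (String × String))) (out : Option String × (Option (List (String × String)))) : Prop := out = find_artist_by_name_alt query id_to_artist
instance (query : String) (id_to_artist : List (String × List (String × String))) (out : Option String × (Option (List (String × String)))) : Decidable (Spec_find_artist_by_name query id_to_artist out) := by unfold Spec_find_artist_by_name; infer_instance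

-- ===== CLAIM (what is proved, stated in full; the proofs are below) =====
def Claim_equal_find_artist_by_name : Prop := ∀ (query : String) (id_to_artist : List (String × List (String × String))), Dom_find_artist_by_name query id_to_artist → Pre_find_artist_by_name query id_to_artist → Spec_find_artist_by_name query id_to_artist (find_artist_by_name query id_to_artist)

-- ===== LEMMAS AND PROOFS =====

-- a dict that owns the key 'name' is a nonempty (truthy) dict
lemma pv_size_ne_zero_of_name {d : PySem.Dict String String} (h : (d.get? "name").isSome = true) : d.size ≠ 0 := by
  rcases d with ⟨items⟩
  cases items with
  | nil => simp [PySem.Dict.get?] at h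
  | cons p rest => simp [PySem.Dict.size]

-- the single pass equals A's two loops, for any sentinel state whose recorded dict is truthy
lemma pv_scan_eq (query : String) :
    ∀ (l : List (PySem.Dict String String)),
      (∀ d ∈ l, (d.get? "name").isSome = true) →
      ∀ (p : Option (PySem.Dict String String)), (∀ d, p = some d → d.size ≠ 0) →
      pvScan (PySem.Str.lower query) p l =
        match pvExactLoop query l with
        | some r => r
        | none =>
          match (match p with | some d => some d | none => pvPartialLoop query l) with
          | some d => if d.size ≠ 0 then (some "partial", some d.items) else (none, none)
          | none => (none, none) := by
  intro l
  induction l with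
  | nil =>
    intro _ p hp
    match p with
    | none => simp [pvScan, pvExactLoop, pvPartialLoop]
    | some d => simp [pvScan, pvExactLoop, hp d rfl]
  | cons d rest ih =>
    intro hl p hp
    have hrest : ∀ d' ∈ rest, (d'.get? "name").isSome = true := fun d' hd' => hl d' (by simp [hd'])
    by_cases hex : (PySem.Str.lower query == PySem.Str.lower ((d.get? "name").getD "")) = true
    · simp [pvScan, pvExactLoop, hex]
    · have hex' : (PySem.Str.lower query == PySem.Str.lower ((d.get? "name").getD "")) = false := by
        simpa using hex
      match p with
      | some d0 =>
        simp only [pvScan, pvExactLoop, hex', Bool.false_eq_true, if_false, Option.isNone_some,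
          Bool.false_and]
        rw [ih hrest (some d0) hp]
      | none =>
        by_cases hin : PySem.Str.isIn (PySem.Str.lower query) (PySem.Str.lower ((d.get? "name").getD "")) = true
        · have hdsz : d.size ≠ 0 := pv_size_ne_zero_of_name (hl d (by simp))
          simp only [pvScan, pvExactLoop, pvPartialLoop, hex', hin, Bool.false_eq_true, if_false,
            if_true, Option.isNone_none, Bool.true_and]
          rw [ih hrest (some d) (by intro d' hd'; cases hd'; exact hdsz)]
        · have hin' : PySem.Str.isIn (PySem.Str.lower query) (PySem.Str.lower ((d.get? "name").getD "")) = false := by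
            simpa using hin
          simp only [pvScan, pvExactLoop, pvPartialLoop, hex', hin', Bool.false_eq_true, if_false,
            Option.isNone_none, Bool.true_and]
          rw [ih hrest none (by intro d' hd'; cases hd')]

-- ===== VERDICT (by name: the statement is the Claim_ definition above) =====
theorem find_artist_by_name_spec : Claim_equal_find_artist_by_name := by
  intro query id_to_artist _ hpre
  unfold Spec_find_artist_by_name find_artist_by_name find_artist_by_name_alt
  rw [pv_scan_eq query (pvVals id_to_artist) hpre none (by intro d hd; cases hd)]
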